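-- pv_equiv track=rewrite | github.com/IvoLims/PLC-TP-G3 | prog.py | transform
-- ===== SOURCE A (Python) =====
-- def get_crude_abbrev(name):
--     '''Transforma um nome de autor nas primeiras letras
--        de cada um de seus nomes.
--
--        Por exemplo: Ricardo Henriques → RH'''
--     return ''.join(c for c in name if c.isupper())
--
-- def transform(authors):
--     '''Retorna das abreviacoes dos autores.'''
--     d = {}
--     for author in authors:
--         crude_abbrev = get_crude_abbrev(author)
--         if crude_abbrev not in d:
--             d[crude_abbrev] = set()
--         d[crude_abbrev].add(author)
--     return d
-- ===== SOURCE B (Python) =====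
-- def get_crude_abbrev(name):
--     '''Transforma um nome de autor nas primeiras letras
--        de cada um de seus nomes.'''
--     return ''.join(c for c in name if c.isupper())
--
-- def transform(authors):
--     '''Retorna das abreviacoes dos autores.'''
--     pairs = [(get_crude_abbrev(a), a) for a in authors]
--     keys = []
--     for k, _ in pairs:
--         if k not in keys:
--             keys.append(k)
--     result = {}
--     for k in keys:
--         group = []
--         for k2, a in pairs:
--             if k2 == k and a not in group:
--                 group.append(a)
--         result[k] = set(group)
--     return result
-- ===== Notes on version B (the rewrite author's own statement) =====
-- stated objective: alternative
-- what changed: replaces the single-pass dict-of-sets bucketing with a two-phase plan: precompute (abbrev, author) pairs, collect the distinct abbrevs in first-occurrence order, then build each group by a separate ordered-dedup scan over the pairs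
import Mathlib
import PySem

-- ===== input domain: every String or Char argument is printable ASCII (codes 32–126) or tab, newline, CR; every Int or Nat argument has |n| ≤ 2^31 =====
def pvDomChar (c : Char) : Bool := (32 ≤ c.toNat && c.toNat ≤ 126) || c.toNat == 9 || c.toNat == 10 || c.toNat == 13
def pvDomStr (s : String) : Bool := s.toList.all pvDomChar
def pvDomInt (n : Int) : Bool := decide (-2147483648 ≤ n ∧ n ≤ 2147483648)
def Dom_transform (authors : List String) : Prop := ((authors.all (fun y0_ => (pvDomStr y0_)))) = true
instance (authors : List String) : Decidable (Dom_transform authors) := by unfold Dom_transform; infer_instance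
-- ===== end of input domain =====

-- B groups the authors in two phases (distinct abbrevs first, then one dedup scan per abbrev)
-- instead of A's single-pass dict-of-sets bucketing; equal return value, no speed claim.

-- ===== PORT A =====
def getCrudeAbbrev (name : String) : String :=
  String.ofList (name.toList.filter (fun c => PySem.Chars.isupper c))

def transform (authors : List String) : List (String × List String) :=
  (authors.foldl (fun d author =>
      let k := getCrudeAbbrev author
      let d := if d.contains k then d else d.insert k PySem.Set.empty
      d.modify k PySem.Set.empty (fun s => PySem.Set.add s author))
    PySem.Dict.empty).items

-- ===== PORT B =====
def transform_alt (authors : List String) : List (String × List String) :=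
  let pairs := authors.map (fun a => (getCrudeAbbrev a, a))
  let keys := pairs.foldl (fun ks p => if p.1 ∈ ks then ks else ks ++ [p.1]) []
  let result := keys.foldl (fun r k =>
      let group := pairs.foldl (fun g p => if p.1 = k ∧ p.2 ∉ g then g ++ [p.2] else g) []
      r.insert k (PySem.Set.ofList group)) PySem.Dict.empty
  result.items

-- ===== PRECONDITION & SPEC =====
def Spec_transform (authors : List String) (out : List (String × List String)) : Prop := out = transform_alt authors
instance (authors : List String) (out : List (String × List String)) : Decidable (Spec_transform authors out) := by unfold Spec_transform; infer_instance

-- ===== CLAIM (what is proved, stated in full; the proofs are below) =====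
def Claim_equal_transform : Prop := ∀ (authors : List String), Dom_transform authors → Spec_transform authors (transform authors)

-- ===== LEMMAS AND PROOFS =====

-- A's loop body, named for the lemmas below
def stepA (d : PySem.Dict String (PySem.Set String)) (author : String) :
    PySem.Dict String (PySem.Set String) :=
  (if d.contains (getCrudeAbbrev author) then d else d.insert (getCrudeAbbrev author) PySem.Set.empty).modify
    (getCrudeAbbrev author) PySem.Set.empty (fun s => PySem.Set.add s author)

theorem stepA_getD (d : PySem.Dict String (PySem.Set String)) (a c : String) :
    (stepA d a).getD c PySem.Set.empty =
      if getCrudeAbbrev a = c then PySem.Set.add (d.getD c PySem.Set.empty) a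
      else d.getD c PySem.Set.empty := by
  unfold stepA
  by_cases h : d.contains (getCrudeAbbrev a)
  · simp only [h, if_true, PySem.Dict.getD_modify]
    by_cases hc : getCrudeAbbrev a = c
    · subst hc; simp
    · simp [hc, Ne.symm hc]
  · simp only [h, if_false, Bool.false_eq_true, PySem.Dict.getD_modify, PySem.Dict.getD_insert]
    by_cases hc : getCrudeAbbrev a = c
    · subst hc; simp [PySem.Dict.getD_of_not_contains _ _ (by simpa using h)]
    · simp [hc, Ne.symm hc]

theorem stepA_keys (d : PySem.Dict String (PySem.Set String)) (a : String) :
    (stepA d a).keys = PySem.Set.add d.keys (getCrudeAbbrev a) := by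
  unfold stepA
  by_cases h : d.contains (getCrudeAbbrev a)
  · rw [if_pos h, PySem.Dict.keys_modify, PySem.Dict.keys_insert_of_contains _ _ h,
      PySem.Set.add_of_mem ((PySem.Dict.contains_iff_mem_keys d _).mp h)]
  · rw [if_neg h, PySem.Dict.keys_modify,
      PySem.Dict.keys_insert_of_contains _ _ (PySem.Dict.contains_insert_self _ _ _),
      PySem.Dict.keys_insert_of_not_contains _ _ (by simpa using h),
      PySem.Set.add_of_not_mem (fun hm => h ((PySem.Dict.contains_iff_mem_keys d _).mpr hm))]

theorem foldA_getD (l : List String) (d : PySem.Dict String (PySem.Set String)) (c : String) :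
    (l.foldl stepA d).getD c PySem.Set.empty =
      (l.filter (fun a => getCrudeAbbrev a == c)).foldl PySem.Set.add (d.getD c PySem.Set.empty) := by
  induction l generalizing d with
  | nil => rfl
  | cons a l ih =>
    simp only [List.foldl_cons, List.filter_cons]
    by_cases h : getCrudeAbbrev a = c
    · simp only [h, BEq.rfl, if_true, List.foldl_cons, ih, stepA_getD]
    · have hb : (getCrudeAbbrev a == c) = false := by simpa using h
      simp only [hb, Bool.false_eq_true, if_false, ih, stepA_getD, if_neg h]

theorem foldA_keys (l : List String) (d : PySem.Dict String (PySem.Set String)) :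
    (l.foldl stepA d).keys = PySem.Set.update d.keys (l.map getCrudeAbbrev) := by
  induction l generalizing d with
  | nil => rfl
  | cons a l ih =>
    simp only [List.foldl_cons, List.map_cons, PySem.Set.update_cons, ih, stepA_keys]

theorem innerB (l : List (String × String)) (k : String) (g : PySem.Set String) :
    l.foldl (fun g p => if p.1 = k ∧ p.2 ∉ g then g ++ [p.2] else g) g =
      ((l.filter (fun p => p.1 == k)).map (fun p => p.2)).foldl PySem.Set.add g := by
  induction l generalizing g with
  | nil => rfl
  | cons p l ih =>
    simp only [List.foldl_cons, List.filter_cons]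
    by_cases h : p.1 = k
    · simp only [h, BEq.rfl, if_true, List.map_cons, List.foldl_cons, ih,
        PySem.Set.add_eq_ite]
      by_cases hm : p.2 ∈ g
      · simp [hm]
      · simp [hm]
    · have hb : (p.1 == k) = false := by simpa using h
      simp only [hb, Bool.false_eq_true, if_false, ih, h, false_and, if_false]

-- ===== VERDICT (by name: the statement is the Claim_ definition above) =====
theorem transform_spec : Claim_equal_transform := by
  intro authors _
  show transform authors = transform_alt authors
  have hA : transform authors = (authors.foldl stepA PySem.Dict.empty).items := rfl
  have hkeys : (authors.foldl stepA PySem.Dict.empty).keys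
      = PySem.Set.ofList (authors.map getCrudeAbbrev) := by
    rw [foldA_keys]; rfl
  have hnd : (authors.foldl stepA PySem.Dict.empty).keys.Nodup := by
    rw [hkeys]; exact PySem.Set.nodup_ofList _
  rw [hA, PySem.Dict.items_eq_map_keys _ hnd PySem.Set.empty, hkeys]
  unfold transform_alt
  simp only [← PySem.Set.add_eq_ite, ← PySem.Set.update_map_eq_foldl_add,
    PySem.Set.update_nil_left, List.map_map]
  simp only [Function.comp_def]
  rw [PySem.Dict.items_foldl_insert_fresh _ (fun k => k) _ _
    (by intro a _; rfl)
    (by rw [List.map_id']; exact hkeys ▸ hnd)]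
  rw [show (PySem.Dict.empty : PySem.Dict String (PySem.Set String)).items = [] from rfl,
    List.nil_append]
  apply List.map_congr_left
  intro k hk
  refine Prod.ext rfl ?_
  show (authors.foldl stepA PySem.Dict.empty).getD k PySem.Set.empty = _
  rw [foldA_getD, innerB, List.filter_map]
  simp only [Function.comp_def, List.map_map]
  rw [show (PySem.Dict.empty : PySem.Dict String (PySem.Set String)).getD k PySem.Set.empty
      = ([] : PySem.Set String) from rfl]
  rw [← PySem.Set.ofList_eq_foldl, List.map_id', ← PySem.Set.ofList_eq_foldl, PySem.Set.ofList_ofList]
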